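-- pv_equiv track=rewrite | github.com/hexafe/metroliza | modules/export_summary_utils.py | build_sparse_unique_labels
-- ===== SOURCE A (Python) =====
-- def build_sparse_unique_labels(labels):
--     """Return labels with repeated values blanked for clearer x-axis display."""
--     seen = set()
--     sparse_labels = []
--     for label in labels:
--         if label in seen:
--             sparse_labels.append('')
--             continue
--         seen.add(label)
--         sparse_labels.append(label)
--     return sparse_labels
-- ===== SOURCE B (Python) =====
-- def build_sparse_unique_labels(labels):
--     """Return labels with repeated values blanked for clearer x-axis display."""
--     xs = list(labels)
--     first = {}
--     for i, label in enumerate(xs):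
--         first.setdefault(label, i)
--     return [label if first[label] == i else '' for i, label in enumerate(xs)]
-- ===== Notes on version B (the rewrite author's own statement) =====
-- stated objective: alternative
-- what changed: Replaces the single grow-a-seen-set pass with two passes over a materialized list: first build a dict of each label's earliest index with setdefault, then a comprehension over enumerate emits the label only at its recorded first index.
import Mathlib
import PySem

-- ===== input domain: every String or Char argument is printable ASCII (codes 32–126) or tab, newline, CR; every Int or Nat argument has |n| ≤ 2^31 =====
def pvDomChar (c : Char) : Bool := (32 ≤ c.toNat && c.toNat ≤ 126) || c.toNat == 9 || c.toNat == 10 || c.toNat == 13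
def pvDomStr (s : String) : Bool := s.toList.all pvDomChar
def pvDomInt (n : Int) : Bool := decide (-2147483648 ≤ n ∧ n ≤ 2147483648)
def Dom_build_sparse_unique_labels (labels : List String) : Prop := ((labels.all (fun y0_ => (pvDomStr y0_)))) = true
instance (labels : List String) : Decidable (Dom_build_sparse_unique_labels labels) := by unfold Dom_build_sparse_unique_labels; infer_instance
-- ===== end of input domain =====

-- B replaces A's single pass growing a seen-set by two passes: build a dict of first-occurrence
-- indices, then emit each label only at its recorded first index (objective: alternative).

-- ===== PORT A =====
-- loop body of A: state = (seen, sparse_labels)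
def pvAStep (st : PySem.Set String × List String) (label : String) : PySem.Set String × List String :=
  if PySem.Set.contains st.1 label then (st.1, st.2 ++ [""])
  else (PySem.Set.add st.1 label, st.2 ++ [label])

def build_sparse_unique_labels (labels : List String) : List String :=
  (labels.foldl pvAStep (PySem.Set.empty, [])).2

-- ===== PORT B =====
-- first.setdefault(label, i)  (exact: same items as PySem.Dict.setdefault)
def pvBStep (d : PySem.Dict String Int) (p : Int × String) : PySem.Dict String Int :=
  if d.contains p.2 then d else d.insert p.2 p.1

def build_sparse_unique_labels_alt (labels : List String) : List String :=
  let xs := labels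
  let first := (PySem.List.enumerate xs).foldl pvBStep PySem.Dict.empty
  (PySem.List.enumerate xs).map (fun p => if first.get? p.2 = some p.1 then p.2 else "")

-- ===== PRECONDITION & SPEC =====
def Spec_build_sparse_unique_labels (labels : List String) (out : List String) : Prop := out = build_sparse_unique_labels_alt labels
instance (labels : List String) (out : List String) : Decidable (Spec_build_sparse_unique_labels labels out) := by unfold Spec_build_sparse_unique_labels; infer_instance

-- ===== CLAIM (what is proved, stated in full; the proofs are below) =====
def Claim_equal_build_sparse_unique_labels : Prop := ∀ (labels : List String), Dom_build_sparse_unique_labels labels → Spec_build_sparse_unique_labels labels (build_sparse_unique_labels labels)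

-- ===== LEMMAS AND PROOFS =====

-- reference recursion: blank a label iff it occurs in the accumulated key list
def pvRef (ks : List String) : List String → List String
  | [] => []
  | x :: xs => if x ∈ ks then "" :: pvRef ks xs else x :: pvRef (ks ++ [x]) xs

theorem pvA_fold (xs : List String) : ∀ (s : PySem.Set String) (acc : List String),
    (xs.foldl pvAStep (s, acc)).2 = acc ++ pvRef s xs := by
  induction xs with
  | nil => intro s acc; simp [pvRef]
  | cons x xs ih =>
    intro s acc
    by_cases h : x ∈ s
    · have hc : PySem.Set.contains s x = true := by simpa using h
      simp [pvAStep, pvRef, h, ih]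
    · have hc : PySem.Set.contains s x = false := by simpa using h
      have hadd : PySem.Set.add s x = s ++ [x] := by
        simp [PySem.Set.add]; exact h
      simp only [List.foldl_cons, pvAStep, hc, pvRef, if_neg h, hadd, ih]
      simp

-- once a key is in the dict, the setdefault fold never changes its value
theorem pvB_preserve (xs : List String) : ∀ (s : Int) (d : PySem.Dict String Int) (y : String),
    d.contains y = true →
    ((PySem.List.enumerate xs s).foldl pvBStep d).get? y = d.get? y := by
  induction xs with
  | nil => intro s d y _; simp [PySem.List.enumerate_nil]
  | cons x xs ih =>
    intro s d y hy
    rw [PySem.List.enumerate_cons, List.foldl_cons]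
    by_cases hc : d.contains x = true
    · simpa [pvBStep, hc] using ih (s + 1) d y hy
    · have hne : y ≠ x := by intro h; rw [h] at hy; simp [hc] at hy
      have hy' : (d.insert x s).contains y = true := by
        simp [PySem.Dict.contains_insert, hy]
      have := ih (s + 1) (d.insert x s) y hy'
      simp only [pvBStep] at *
      rw [if_neg (by simp [hc])]
      rw [this, PySem.Dict.get?_insert_of_ne _ _ hne]

theorem pvB_main (xs : List String) : ∀ (s : Int) (d : PySem.Dict String Int),
    (∀ y v, d.get? y = some v → v < s) →
    (PySem.List.enumerate xs s).map
        (fun p => if ((PySem.List.enumerate xs s).foldl pvBStep d).get? p.2 = some p.1 then p.2 else "")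
      = pvRef d.keys xs := by
  induction xs with
  | nil => intro s d _; simp [PySem.List.enumerate_nil, pvRef]
  | cons x xs ih =>
    intro s d hinv
    rw [PySem.List.enumerate_cons]
    by_cases hc : d.contains x = true
    · have hx : x ∈ d.keys := (PySem.Dict.contains_iff_mem_keys d x).1 hc
      have hstep : pvBStep d (s, x) = d := by simp [pvBStep, hc]
      have hinv' : ∀ y v, d.get? y = some v → v < s + 1 := fun y v h => by
        have := hinv y v h; omega
      have htail := ih (s + 1) d hinv'
      have hhead : ((PySem.List.enumerate xs (s + 1)).foldl pvBStep d).get? x ≠ some s := by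
        rw [pvB_preserve xs (s + 1) d x hc]
        intro h
        exact absurd (hinv x s h) (lt_irrefl s)
      simp only [List.foldl_cons, hstep, List.map_cons, pvRef, if_pos hx]
      rw [if_neg hhead]
      exact congrArg _ htail
    · have hx : x ∉ d.keys := fun h => hc ((PySem.Dict.contains_iff_mem_keys d x).2 h)
      have hstep : pvBStep d (s, x) = d.insert x s := by simp [pvBStep, hc]
      have hinv' : ∀ y v, (d.insert x s).get? y = some v → v < s + 1 := by
        intro y v h
        by_cases hyx : y = x
        · subst hyx
          rw [PySem.Dict.get?_insert_self] at h
          have := Option.some.inj h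
          omega
        · rw [PySem.Dict.get?_insert_of_ne _ _ hyx] at h
          have := hinv y v h; omega
      have htail := ih (s + 1) (d.insert x s) hinv'
      have hkeys : (d.insert x s).keys = d.keys ++ [x] :=
        PySem.Dict.keys_insert_of_not_contains d s (by simpa using hc)
      have hcontains : (d.insert x s).contains x = true := PySem.Dict.contains_insert_self _ _ _
      have hhead : ((PySem.List.enumerate xs (s + 1)).foldl pvBStep (d.insert x s)).get? x = some s := by
        rw [pvB_preserve xs (s + 1) _ x hcontains, PySem.Dict.get?_insert_self]
      rw [hkeys] at htail
      simp only [List.foldl_cons, hstep, List.map_cons, pvRef, if_neg hx]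
      rw [if_pos hhead]
      exact congrArg _ htail

-- ===== VERDICT (by name: the statement is the Claim_ definition above) =====
theorem build_sparse_unique_labels_spec : Claim_equal_build_sparse_unique_labels := by
  intro labels _
  unfold Spec_build_sparse_unique_labels build_sparse_unique_labels build_sparse_unique_labels_alt
  rw [pvA_fold labels PySem.Set.empty []]
  have := pvB_main labels 0 PySem.Dict.empty (by intro y v h; simp [PySem.Dict.get?_empty] at h)
  simp only [PySem.Dict.keys_empty] at this
  simpa [PySem.Set.empty] using this.symm
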